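-- pv_equiv track=rewrite | github.com/akivajp/acl2015 | explib-python/lib/exp/ruletable/record.py | getTravatarTerms
-- ===== SOURCE A (Python) =====
-- def getTravatarTerms(rule):
--   terms = []
--   for s in rule.split(' '):
--     if len(s) < 2:
--       if s == "@":
--         break
--     elif s[0] == '"' and s[-1] == '"':
--       terms.append(s[1:-1])
--   return terms
-- ===== SOURCE B (Python) =====
-- def getTravatarTerms(rule):
--     tokens = rule.split(' ')
--     idx = tokens.index('@') if '@' in tokens else len(tokens)
--     return [s[1:-1] for s in tokens[:idx]
--             if len(s) >= 2 and s[0] == '"' and s[-1] == '"']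
-- ===== Notes on version B (the rewrite author's own statement) =====
-- stated objective: idiomatic
-- what changed: B separates the two concerns: it first computes the cutoff index of the sentinel token with tokens.index, then filters and strips quoted tokens from that prefix with one comprehension, instead of A's single loop with an inner break and an explicit accumulator.
import Mathlib
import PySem

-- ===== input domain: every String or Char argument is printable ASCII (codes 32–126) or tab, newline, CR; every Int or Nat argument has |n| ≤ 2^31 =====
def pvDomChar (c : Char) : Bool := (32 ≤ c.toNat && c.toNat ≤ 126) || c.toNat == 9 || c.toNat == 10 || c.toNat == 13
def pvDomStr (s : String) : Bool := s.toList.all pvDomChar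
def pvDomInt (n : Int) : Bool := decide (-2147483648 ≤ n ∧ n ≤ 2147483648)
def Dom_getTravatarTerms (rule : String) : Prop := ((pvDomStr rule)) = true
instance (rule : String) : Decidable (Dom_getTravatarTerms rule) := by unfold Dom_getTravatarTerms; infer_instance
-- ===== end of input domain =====

-- B separates finding the sentinel token (tokens.index) from filtering quoted tokens
-- (one comprehension over the prefix), instead of A's single break-loop; same O(n) cost.

-- ===== PORT A =====
-- A's loop with its accumulator and the break on "@"
def pvGoA (acc : List String) (toks : List String) : List String :=
  match toks with
  | [] => acc
  | s :: rest =>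
    if PySem.Str.len s < 2 then
      if s == "@" then acc else pvGoA acc rest
    else
      if PySem.Str.pyGet? s 0 == some '"' && PySem.Str.pyGet? s (-1) == some '"' then
        pvGoA (acc ++ [PySem.Str.slice s (some 1) (some (-1))]) rest
      else pvGoA acc rest

def getTravatarTerms (rule : String) : List String :=
  pvGoA [] ((PySem.Str.split? rule " ").getD [])

-- ===== PORT B =====
-- the comprehension's filter condition
def pvQuoted (s : String) : Bool :=
  decide (2 ≤ PySem.Str.len s) &&
    (PySem.Str.pyGet? s 0 == some '"') && (PySem.Str.pyGet? s (-1) == some '"')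

def getTravatarTerms_alt (rule : String) : List String :=
  let tokens := (PySem.Str.split? rule " ").getD []
  let idx : Nat :=
    if tokens.contains "@" then (PySem.List.index? tokens "@").getD 0 else tokens.length
  ((PySem.List.slice tokens none (some (idx : Int))).filter pvQuoted).map
    (fun s => PySem.Str.slice s (some 1) (some (-1)))

-- ===== PRECONDITION & SPEC =====
def Spec_getTravatarTerms (rule : String) (out : List String) : Prop := out = getTravatarTerms_alt rule
instance (rule : String) (out : List String) : Decidable (Spec_getTravatarTerms rule out) := by unfold Spec_getTravatarTerms; infer_instance

-- ===== CLAIM (what is proved, stated in full; the proofs are below) =====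
def Claim_equal_getTravatarTerms : Prop := ∀ (rule : String), Dom_getTravatarTerms rule → Spec_getTravatarTerms rule (getTravatarTerms rule)

-- ===== LEMMAS AND PROOFS =====

-- unfolding pvGoA on a cons cell
theorem pvGoA_cons (acc : List String) (s : String) (rest : List String) :
    pvGoA acc (s :: rest) =
      if PySem.Str.len s < 2 then
        (if s == "@" then acc else pvGoA acc rest)
      else
        if PySem.Str.pyGet? s 0 == some '"' && PySem.Str.pyGet? s (-1) == some '"' then
          pvGoA (acc ++ [PySem.Str.slice s (some 1) (some (-1))]) rest
        else pvGoA acc rest := rfl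

-- B's computed cutoff prefix tokens[:idx] is the takeWhile-(not "@") prefix
theorem pv_slice_idx (toks : List String) :
    PySem.List.slice toks none
        (some ((if toks.contains "@" then (PySem.List.index? toks "@").getD 0 else toks.length : Nat) : Int))
      = toks.takeWhile (fun s => !(s == "@")) := by
  rw [PySem.List.slice_to_natCast]
  induction toks with
  | nil => simp
  | cons s rest ih =>
    by_cases hs : s = "@"
    · subst hs
      rw [PySem.List.index?_cons_self]
      simp
    · rw [PySem.List.index?_cons_of_ne _ hs]
      by_cases hc : rest.contains "@" = true
      · obtain ⟨k, hk⟩ := Option.isSome_iff_exists.mp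
          (by rw [PySem.List.index?_eq_idxOf?]; exact List.isSome_idxOf?.mpr (by simpa using hc)
            : (PySem.List.index? rest "@").isSome = true)
        simp only [hc, if_true] at ih
        rw [hk] at ih
        simp only [List.contains_cons, hc, Bool.or_true, if_true, hk, Option.map_some,
          Option.getD_some, List.take_succ_cons, List.takeWhile_cons]
        simp only [Option.getD_some] at ih
        simp [hs, ih]
      · simp only [hc, Bool.false_eq_true, if_false] at ih
        rw [if_neg (fun h => Or.elim (by simpa using h : "@" = s ∨ "@" ∈ rest)
          (fun h1 => hs h1.symm) (fun h2 => hc (by simpa using h2)))]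
        simp only [List.length_cons, List.take_succ_cons, List.takeWhile_cons]
        simp [hs, ih]

-- A's loop equals the filter-map of the takeWhile prefix, for any accumulator
theorem pv_goA_eq (toks acc : List String) :
    pvGoA acc toks
      = acc ++ ((toks.takeWhile (fun s => !(s == "@"))).filter pvQuoted).map
          (fun s => PySem.Str.slice s (some 1) (some (-1))) := by
  induction toks generalizing acc with
  | nil => simp [pvGoA]
  | cons s rest ih =>
    rw [pvGoA_cons, List.takeWhile_cons]
    by_cases hs : s = "@"
    · subst hs
      rw [if_pos (by simp [PySem.Str.len_eq]), if_pos (by simp), if_neg (by simp)]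
      simp
    · rw [if_pos (show (!(s == "@")) = true by simp [hs]), List.filter_cons]
      by_cases hl : s.length < 2
      · have hq : pvQuoted s = false := by
          simp only [pvQuoted]
          rw [show (decide (2 ≤ PySem.Str.len s)) = false by simp [PySem.Str.len_eq]; omega]
          simp
        rw [if_pos (by simp [PySem.Str.len_eq]; omega), if_neg (by simpa using hs), hq]
        simp [ih]
      · have h2 : decide (2 ≤ PySem.Str.len s) = true := by simp [PySem.Str.len_eq]; omega
        have hq : pvQuoted s
            = (PySem.Str.pyGet? s 0 == some '"' && PySem.Str.pyGet? s (-1) == some '"') := by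
          simp only [pvQuoted, h2, Bool.true_and]
        rw [if_neg (by simp [PySem.Str.len_eq]; omega), hq]
        by_cases hm : (PySem.Str.pyGet? s 0 == some '"' && PySem.Str.pyGet? s (-1) == some '"') = true
        · rw [if_pos hm, hm]
          simp [ih]
        · rw [if_neg hm, show (PySem.Str.pyGet? s 0 == some '"' && PySem.Str.pyGet? s (-1) == some '"') = false from Bool.eq_false_iff.mpr hm]
          simp [ih]

-- ===== VERDICT (by name: the statement is the Claim_ definition above) =====
theorem getTravatarTerms_spec : Claim_equal_getTravatarTerms := by
  intro rule _
  unfold Spec_getTravatarTerms getTravatarTerms getTravatarTerms_alt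
  rw [pv_goA_eq]
  simp only [List.nil_append, pv_slice_idx]
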